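-- pv_equiv track=rewrite | github.com/lxmliu2002/Algorithm_Design_and_Analysis | homework5/E5.01-Optimal Caching/E5.01-Optimal Caching.py | ifFF
-- ===== SOURCE A (Python) =====
-- from typing import List
--
-- def ifFF(vecc: List[int], vecr: List[int], pos: int, newvecc: List[int]) -> bool:
--     num = 0
--     for i in range(len(vecc)):
--         m = 0
--         for j in range(pos + 1, len(vecr)):
--             if vecr[j] == vecc[i]:
--                 m += 1
--                 num += 1
--                 break
--         if m == 0:
--             newvecc.append(vecc[i])
--     return num != len(vecc)
-- ===== SOURCE B (Python) =====
-- from typing import List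
--
-- def ifFF(vecc: List[int], vecr: List[int], pos: int, newvecc: List[int]) -> bool:
--     pending = set(vecc)
--     for r in vecr[max(pos + 1, 0):]:
--         if not pending:
--             break
--         pending.discard(r)
--     for c in vecc:
--         if c in pending:
--             newvecc.append(c)
--     return bool(pending)
-- ===== Notes on version B (the rewrite author's own statement) =====
-- stated objective: faster
-- what changed: Replaced the per-item rescans of the future reference list by one set of pending values, a single pass over the future discarding seen values (with early break), and one filter pass to fill newvecc.
import Mathlib
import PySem

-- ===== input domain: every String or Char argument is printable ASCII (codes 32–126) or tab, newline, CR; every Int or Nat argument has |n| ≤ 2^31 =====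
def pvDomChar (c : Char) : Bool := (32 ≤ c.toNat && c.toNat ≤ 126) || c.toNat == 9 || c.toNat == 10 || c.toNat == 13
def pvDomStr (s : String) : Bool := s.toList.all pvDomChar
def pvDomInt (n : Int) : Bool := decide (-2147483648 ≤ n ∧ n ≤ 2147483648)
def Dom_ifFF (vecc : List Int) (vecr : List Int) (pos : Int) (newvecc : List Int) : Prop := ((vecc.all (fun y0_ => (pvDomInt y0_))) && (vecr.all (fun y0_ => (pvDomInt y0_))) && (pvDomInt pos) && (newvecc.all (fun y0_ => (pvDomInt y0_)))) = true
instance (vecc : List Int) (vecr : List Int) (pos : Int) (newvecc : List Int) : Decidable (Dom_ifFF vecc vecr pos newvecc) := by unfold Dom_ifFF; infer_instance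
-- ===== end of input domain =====

-- B replaces A's per-item rescans of the future slice by one set of pending values, a single
-- discarding pass over the future and a filter pass; equivalence is about the RETURN value
-- (both versions append the same elements to newvecc in the same order, but that is not claimed).

-- ===== PORT A =====
-- outer loop 'for i in range(len(vecc))' carrying (num, newvecc); the inner break-search
-- 'for j in range(pos+1, len(vecr)): if vecr[j]==vecc[i]: …; break' is the any-search over that range
def ifFF (vecc : List Int) (vecr : List Int) (pos : Int) (newvecc : List Int) : Bool :=
  let st := (PySem.List.pyRange 0 vecc.length 1).foldl
    (fun (st : Int × List Int) i =>
      let c := PySem.List.pyGetD vecc i 0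
      let m : Int := if (PySem.List.pyRange (pos + 1) vecr.length 1).any
          (fun j => PySem.List.pyGetD vecr j 0 == c) then 1 else 0
      ((st.1 + m), if m == 0 then st.2 ++ [c] else st.2))
    (0, newvecc)
  st.1 != (vecc.length : Int)

-- ===== PORT B =====
def ifFF_alt (vecc : List Int) (vecr : List Int) (pos : Int) (newvecc : List Int) : Bool :=
  let fut := PySem.List.slice vecr (some (max (pos + 1) 0)) none
  let pending := fut.foldl
    (fun (p : PySem.Set Int) r => if p.isEmpty then p else PySem.Set.discard p r)
    (PySem.Set.ofList vecc)
  let _nv := newvecc ++ vecc.filter (fun c => PySem.Set.contains pending c)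
  !pending.isEmpty

-- ===== PRECONDITION & SPEC =====
-- Pre_ excludes exactly the inputs where A raises IndexError: vecc nonempty and pos+1 < -len(vecr),
-- where A's first access vecr[pos+1] is out of range.
def Pre_ifFF (vecc : List Int) (vecr : List Int) (pos : Int) (newvecc : List Int) : Prop :=
  vecc = [] ∨ -(vecr.length : Int) ≤ pos + 1
instance (vecc : List Int) (vecr : List Int) (pos : Int) (newvecc : List Int) : Decidable (Pre_ifFF vecc vecr pos newvecc) := by unfold Pre_ifFF; infer_instance
def pvWitness_ifFF : List Int × List Int × Int × List Int := ([1, 2], [2, 3], 0, [])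

def Spec_ifFF (vecc : List Int) (vecr : List Int) (pos : Int) (newvecc : List Int) (out : Bool) : Prop := out = ifFF_alt vecc vecr pos newvecc
instance (vecc : List Int) (vecr : List Int) (pos : Int) (newvecc : List Int) (out : Bool) : Decidable (Spec_ifFF vecc vecr pos newvecc out) := by unfold Spec_ifFF; infer_instance

-- ===== CLAIM (what is proved, stated in full; the proofs are below) =====
def Claim_equal_ifFF : Prop := ∀ (vecc : List Int) (vecr : List Int) (pos : Int) (newvecc : List Int), Dom_ifFF vecc vecr pos newvecc → Pre_ifFF vecc vecr pos newvecc → Spec_ifFF vecc vecr pos newvecc (ifFF vecc vecr pos newvecc)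


-- ===== LEMMAS AND PROOFS =====

-- membership in a drop via an absolute index
theorem mem_drop_iff_idx (l : List Int) (n : Nat) (c : Int) :
    c ∈ l.drop n ↔ ∃ j : Nat, n ≤ j ∧ ∃ hj : j < l.length, l[j] = c := by
  constructor
  · intro h
    rw [List.mem_iff_getElem] at h
    obtain ⟨k, hk, he⟩ := h
    rw [List.getElem_drop] at he
    have hk' : n + k < l.length := by simp at hk; omega
    exact ⟨n + k, by omega, hk', he⟩
  · rintro ⟨j, hnj, hj, he⟩
    have h2 : j - n < (l.drop n).length := by simp; omega
    have h3 : (l.drop n)[j - n] = l[j] := by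
      rw [List.getElem_drop]
      exact getElem_congr rfl (by omega) (by omega)
    rw [← he, ← h3]
    exact List.getElem_mem h2

-- A's fold: the first component counts the items of vecc whose value the break-search finds
theorem ifFF_fold_fst (found : Int → Bool) (vecc : List Int) (n0 : Int) (l0 : List Int) :
    (vecc.foldl (fun (st : Int × List Int) c =>
      let m : Int := if found c then 1 else 0
      ((st.1 + m), if m == 0 then st.2 ++ [c] else st.2)) (n0, l0)).1
    = n0 + (vecc.countP found : Int) := by
  induction vecc generalizing n0 l0 with
  | nil => simp
  | cons c cs ih =>
    simp only [List.foldl_cons, List.countP_cons, ih]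
    by_cases h : found c = true
    · simp only [h, if_true]
      push_cast
      ring
    · simp [h]

-- the inner break-search finds c iff c occurs in the clamped future slice
theorem found_iff (vecr : List Int) (pos : Int) (h : -(vecr.length : Int) ≤ pos + 1) (c : Int) :
    ((PySem.List.pyRange (pos + 1) vecr.length 1).any
        (fun j => PySem.List.pyGetD vecr j 0 == c)) = true
      ↔ c ∈ vecr.drop (max (pos + 1) 0).toNat := by
  rw [List.any_eq_true]
  by_cases hpn : 0 ≤ pos + 1
  · have hm : (max (pos + 1) 0).toNat = (pos + 1).toNat := by omega
    rw [hm, mem_drop_iff_idx]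
    constructor
    · rintro ⟨j, hj, hc⟩
      rw [PySem.List.mem_pyRange_one] at hj
      rw [PySem.List.pyGetD_eq_getElem vecr 0 (by omega) (by omega)] at hc
      exact ⟨j.toNat, by omega, by omega, by simpa using hc⟩
    · rintro ⟨j, hnj, hj, he⟩
      refine ⟨(j : Int), ?_, ?_⟩
      · rw [PySem.List.mem_pyRange_one]; omega
      · rw [PySem.List.pyGetD_eq_getElem vecr 0 (by omega) (by omega)]
        simpa using he
  · have hm : (max (pos + 1) 0).toNat = 0 := by omega
    rw [hm, List.drop_zero]
    constructor
    · rintro ⟨j, hj, hc⟩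
      rw [PySem.List.mem_pyRange_one] at hj
      have hmem := PySem.List.pyGetD_mem vecr (i := j) 0 ⟨by omega, by omega⟩
      simp only [beq_iff_eq] at hc
      rwa [hc] at hmem
    · intro hc
      rw [List.mem_iff_getElem] at hc
      obtain ⟨j, hj, he⟩ := hc
      refine ⟨(j : Int), ?_, ?_⟩
      · rw [PySem.List.mem_pyRange_one]; omega
      · rw [PySem.List.pyGetD_eq_getElem vecr 0 (by omega) (by omega)]
        simpa using he

-- B's guarded fold (early break) equals the plain discard fold
theorem guarded_fold_eq (l : List Int) (p : PySem.Set Int) :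
    l.foldl (fun (p : PySem.Set Int) r => if p.isEmpty then p else PySem.Set.discard p r) p
      = l.foldl PySem.Set.discard p := by
  induction l generalizing p with
  | nil => rfl
  | cons r rs ih =>
    rw [List.foldl_cons, List.foldl_cons]
    by_cases hp : p.isEmpty
    · have hnil : p = [] := List.isEmpty_iff.mp hp
      subst hnil
      rw [if_pos (show ([] : PySem.Set Int).isEmpty = true from rfl), ih]
      simp [PySem.Set.discard]
    · rw [if_neg hp, ih]

theorem mem_discard_fold (l : List Int) (p : PySem.Set Int) (c : Int) :
    c ∈ l.foldl PySem.Set.discard p ↔ c ∈ p ∧ c ∉ l := by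
  induction l generalizing p with
  | nil => simp
  | cons r rs ih =>
    simp only [List.foldl_cons, ih, PySem.Set.mem_discard, List.mem_cons]
    tauto

-- ===== VERDICT (by name: the statement is the Claim_ definition above) =====
theorem ifFF_spec : Claim_equal_ifFF := by
  intro vecc vecr pos newvecc _ hpre
  unfold Spec_ifFF
  -- abbreviations for A's inner search and its fold body
  let found : Int → Bool := fun c =>
    (PySem.List.pyRange (pos + 1) vecr.length 1).any
      (fun j => PySem.List.pyGetD vecr j 0 == c)
  let f : Int × List Int → Int → Int × List Int := fun st c =>
    let m : Int := if found c then 1 else 0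
    ((st.1 + m), if m == 0 then st.2 ++ [c] else st.2)
  -- A's range loop is the fold of f over vecc (defeq through beta/zeta)
  have hA : ifFF vecc vecr pos newvecc
      = ((vecc.foldl f (0, newvecc)).1 != (vecc.length : Int)) :=
    congrArg (fun st : Int × List Int => st.1 != (vecc.length : Int))
      (PySem.List.foldl_pyRange_zero_pyGetD' vecc 0 f (0, newvecc))
  have hcount : (vecc.foldl f (0, newvecc)).1 = 0 + (vecc.countP found : Int) :=
    ifFF_fold_fst found vecc 0 newvecc
  -- B's definition, with the early-break fold replaced by the plain discard fold
  have hB : ifFF_alt vecc vecr pos newvecc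
      = !((PySem.List.slice vecr (some (max (pos + 1) 0)) none).foldl
            (fun (p : PySem.Set Int) r => if p.isEmpty then p else PySem.Set.discard p r)
            (PySem.Set.ofList vecc)).isEmpty := rfl
  rw [PySem.List.slice_from vecr (le_max_right _ _), guarded_fold_eq] at hB
  rw [hA, hcount, hB, Bool.eq_iff_iff]
  simp only [zero_add, bne_iff_ne, ne_eq, Bool.not_eq_eq_eq_not, Bool.not_true,
    List.isEmpty_eq_false_iff]
  by_cases hc : vecc = []
  · subst hc
    constructor
    · intro h; exact absurd rfl h
    · intro h hn
      apply h
      rw [List.eq_nil_iff_forall_not_mem]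
      intro a ha
      rw [mem_discard_fold] at ha
      exact absurd ((PySem.Set.mem_ofList [] a).mp ha.1) (by simp)
  · have hlen : -(vecr.length : Int) ≤ pos + 1 := hpre.resolve_left hc
    have hmem : ∀ a : Int,
        a ∈ (vecr.drop (max (pos + 1) 0).toNat).foldl PySem.Set.discard
              (PySem.Set.ofList vecc)
          ↔ a ∈ vecc ∧ found a ≠ true := by
      intro a
      rw [mem_discard_fold, PySem.Set.mem_ofList]
      constructor
      · rintro ⟨h1, h2⟩
        exact ⟨h1, fun hf => h2 ((found_iff vecr pos hlen a).mp hf)⟩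
      · rintro ⟨h1, h2⟩
        exact ⟨h1, fun hm => h2 ((found_iff vecr pos hlen a).mpr hm)⟩
    constructor
    · intro hne hnil
      apply hne
      have hall : ∀ a ∈ vecc, found a = true := by
        intro a ha
        by_contra hnot
        have : a ∈ ([] : List Int) := by
          rw [← hnil, hmem]; exact ⟨ha, hnot⟩
        simp at this
      rw [List.countP_eq_length.mpr hall]
    · intro hne heq
      apply hne
      rw [List.eq_nil_iff_forall_not_mem]
      intro a ha
      rw [hmem] at ha
      have hall : ∀ b ∈ vecc, found b = true :=
        List.countP_eq_length.mp (by exact_mod_cast heq)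
      exact ha.2 (hall a ha.1)
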